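-- pv_equiv track=rewrite | github.com/verinncoq/converter | preprocessing/raw_data_converter.py | replace__raw_data_r
-- ===== SOURCE A (Python) =====
-- def replace__raw_data_r(lines, converted):
--     if(len(lines) == 0):
--         return ""
--     first = lines.pop(0)
--     index = first.find("raw_data")
--     if(index != -1):
--         s = first[:(index)] + converted
--         return s  + "\n" + replace__raw_data_r(lines, converted)
--     else:
--         return first + "\n" + replace__raw_data_r(lines, converted)
-- ===== SOURCE B (Python) =====
-- def replace__raw_data_r(lines, converted):
--     parts = []
--     while lines:
--         first = lines.pop(0)
--         index = first.find("raw_data")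
--         if index != -1:
--             parts.append(first[:index] + converted)
--         else:
--             parts.append(first)
--         parts.append("\n")
--     return "".join(parts)
-- ===== Notes on version B (the rewrite author's own statement) =====
-- stated objective: faster
-- what changed: Replaces the recursion that rebuilds the result by repeated string concatenation with an iterative loop collecting the pieces in a list and a single ''.join at the end.
import Mathlib
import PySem

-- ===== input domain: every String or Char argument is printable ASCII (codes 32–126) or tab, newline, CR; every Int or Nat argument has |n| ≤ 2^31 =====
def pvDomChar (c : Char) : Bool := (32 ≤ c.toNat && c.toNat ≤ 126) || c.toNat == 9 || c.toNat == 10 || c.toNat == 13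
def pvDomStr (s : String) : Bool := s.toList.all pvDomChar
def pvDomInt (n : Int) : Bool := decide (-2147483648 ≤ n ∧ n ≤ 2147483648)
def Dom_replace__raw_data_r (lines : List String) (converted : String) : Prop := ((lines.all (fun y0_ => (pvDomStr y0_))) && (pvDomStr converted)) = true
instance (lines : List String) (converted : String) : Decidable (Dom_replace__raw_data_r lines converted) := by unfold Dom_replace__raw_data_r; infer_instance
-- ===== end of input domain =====

-- B replaces A's recursion (repeated string concatenation) by an iterative loop that
-- collects the pieces in a list and joins them once at the end (return value only:
-- both Pythons empty the `lines` list in place).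

-- ===== PORT A =====
-- A: recursion popping the first line; on a "raw_data" hit keep the prefix and append converted.
def replace__raw_data_r (lines : List String) (converted : String) : String :=
  match lines with
  | [] => ""
  | first :: rest =>
    let index := PySem.Str.find first "raw_data"
    if index ≠ -1 then
      let s := PySem.Str.slice first none (some index) ++ converted
      s ++ "\n" ++ replace__raw_data_r rest converted
    else
      first ++ "\n" ++ replace__raw_data_r rest converted

-- ===== PORT B =====
-- B: one fold over the lines appending each processed piece plus "\n" to a parts list, then a single join.
def replace__raw_data_r_alt (lines : List String) (converted : String) : String :=
  let parts : List String :=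
    lines.foldl (fun parts first =>
      let index := PySem.Str.find first "raw_data"
      parts ++ [if index ≠ -1 then PySem.Str.slice first none (some index) ++ converted else first, "\n"]) []
  PySem.Str.join "" parts

-- ===== PRECONDITION & SPEC =====
def Spec_replace__raw_data_r (lines : List String) (converted : String) (out : String) : Prop := out = replace__raw_data_r_alt lines converted
instance (lines : List String) (converted : String) (out : String) : Decidable (Spec_replace__raw_data_r lines converted out) := by unfold Spec_replace__raw_data_r; infer_instance

-- ===== CLAIM (what is proved, stated in full; the proofs are below) =====
def Claim_equal_replace__raw_data_r : Prop := ∀ (lines : List String) (converted : String), Dom_replace__raw_data_r lines converted → Spec_replace__raw_data_r lines converted (replace__raw_data_r lines converted)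

-- ===== LEMMAS AND PROOFS =====

theorem pv_join_empty (l : List (List Char)) : PySem.Chars.join [] l = l.flatten := by
  induction l with
  | nil => simp [PySem.Chars.join, List.intercalate, List.intersperse]
  | cons a l ih =>
    cases l with
    | nil => simp [PySem.Chars.join, List.intercalate, List.intersperse]
    | cons b m =>
      simp only [PySem.Chars.join, List.intercalate] at ih ⊢
      simp [List.intersperse] at ih ⊢
      simpa using ih

theorem pv_alt_toList (lines : List String) (converted : String) :
    (replace__raw_data_r_alt lines converted).toList =
      (lines.flatMap (fun first =>
        let index := PySem.Str.find first "raw_data"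
        [if index ≠ -1 then PySem.Str.slice first none (some index) ++ converted else first, "\n"])).flatMap
        String.toList := by
  unfold replace__raw_data_r_alt
  rw [PySem.List.foldl_append_eq_flatMap, PySem.Str.toList_join]
  simp [pv_join_empty, List.flatMap_def]

theorem replace__raw_data_r_eq (lines : List String) (converted : String) :
    replace__raw_data_r lines converted = replace__raw_data_r_alt lines converted := by
  induction lines with
  | nil =>
    apply String.toList_inj.mp
    rw [pv_alt_toList]
    simp [replace__raw_data_r]
  | cons first rest ih =>
    apply String.toList_inj.mp
    rw [pv_alt_toList]
    unfold replace__raw_data_r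
    simp only [List.flatMap_cons, List.flatMap_append]
    split_ifs with h <;> simp [ih, pv_alt_toList]

-- ===== VERDICT (by name: the statement is the Claim_ definition above) =====
theorem replace__raw_data_r_spec : Claim_equal_replace__raw_data_r := by
  intro lines converted _
  exact replace__raw_data_r_eq lines converted
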